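-- pv_equiv track=rewrite | github.com/atahabilder1/Triton | scripts/prepare_full_forge_dataset.py | infer_vulnerability_from_filename
-- ===== SOURCE A (Python) =====
-- def infer_vulnerability_from_filename(filename: str) -> str:
--     """
--     Infer vulnerability type from filename patterns
--     Based on audit report naming conventions
--     """
--     filename_lower = filename.lower()
--
--     # Reentrancy patterns
--     if any(term in filename_lower for term in ['reentr', 'reentran', 'callback', 'race', 'toctou']):
--         return 'reentrancy'
--
--     # Arithmetic patterns
--     if any(term in filename_lower for term in ['overflow', 'underflow', 'arithmetic', 'safemath', 'math', 'integer']):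
--         return 'arithmetic'
--
--     # Access control patterns
--     if any(term in filename_lower for term in ['access', 'auth', 'owner', 'admin', 'privilege', 'permission', 'role']):
--         return 'access_control'
--
--     # Unchecked calls patterns
--     if any(term in filename_lower for term in ['unchecked', 'call', 'delegatecall', 'send', 'transfer', 'return']):
--         return 'unchecked_low_level_calls'
--
--     # DOS patterns
--     if any(term in filename_lower for term in ['dos', 'denial', 'gas', 'loop', 'unbounded', 'block']):
--         return 'denial_of_service'
--
--     # Time manipulation patterns
--     if any(term in filename_lower for term in ['timestamp', 'time', 'block.number', 'now', 'temporal']):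
--         return 'time_manipulation'
--
--     # Randomness patterns
--     if any(term in filename_lower for term in ['random', 'rng', 'seed', 'nonce', 'predictable']):
--         return 'bad_randomness'
--
--     # Front-running patterns
--     if any(term in filename_lower for term in ['frontrun', 'front-run', 'mev', 'order']):
--         return 'front_running'
--
--     # Safe contracts (tokens, standard implementations)
--     if any(term in filename_lower for term in ['erc20', 'erc721', 'erc1155', 'standard', 'openzeppelin']):
--         return 'safe'
--
--     return 'other'
-- ===== SOURCE B (Python) =====
-- _LABELS = ['reentrancy', 'arithmetic', 'access_control', 'unchecked_low_level_calls',
--            'denial_of_service', 'time_manipulation', 'bad_randomness', 'front_running', 'safe']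
--
-- _PATTERNS = [
--     ('reentr', 0), ('reentran', 0), ('callback', 0), ('race', 0), ('toctou', 0),
--     ('overflow', 1), ('underflow', 1), ('arithmetic', 1), ('safemath', 1), ('math', 1), ('integer', 1),
--     ('access', 2), ('auth', 2), ('owner', 2), ('admin', 2), ('privilege', 2), ('permission', 2), ('role', 2),
--     ('unchecked', 3), ('call', 3), ('delegatecall', 3), ('send', 3), ('transfer', 3), ('return', 3),
--     ('dos', 4), ('denial', 4), ('gas', 4), ('loop', 4), ('unbounded', 4), ('block', 4),
--     ('timestamp', 5), ('time', 5), ('block.number', 5), ('now', 5), ('temporal', 5),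
--     ('random', 6), ('rng', 6), ('seed', 6), ('nonce', 6), ('predictable', 6),
--     ('frontrun', 7), ('front-run', 7), ('mev', 7), ('order', 7),
--     ('erc20', 8), ('erc721', 8), ('erc1155', 8), ('standard', 8), ('openzeppelin', 8),
-- ]
--
-- def infer_vulnerability_from_filename(filename: str) -> str:
--     # Single left-to-right scan of the text: at every position prefix-match each
--     # pattern and keep the lowest (highest-priority) category index seen anywhere.
--     fl = filename.lower()
--     best = len(_LABELS)
--     for i in range(len(fl)):
--         for pat, ci in _PATTERNS:
--             if fl.startswith(pat, i):
--                 best = min(best, ci)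
--     return _LABELS[best] if best < len(_LABELS) else 'other'
-- ===== Notes on version B (the rewrite author's own statement) =====
-- stated objective: alternative
-- what changed: Replaced the eight ordered per-category substring tests by a single left-to-right scan of the lowered filename that prefix-matches a flat (pattern, category-index) table at every position and keeps the minimum category index, indexing a label list at the end.
import Mathlib
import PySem

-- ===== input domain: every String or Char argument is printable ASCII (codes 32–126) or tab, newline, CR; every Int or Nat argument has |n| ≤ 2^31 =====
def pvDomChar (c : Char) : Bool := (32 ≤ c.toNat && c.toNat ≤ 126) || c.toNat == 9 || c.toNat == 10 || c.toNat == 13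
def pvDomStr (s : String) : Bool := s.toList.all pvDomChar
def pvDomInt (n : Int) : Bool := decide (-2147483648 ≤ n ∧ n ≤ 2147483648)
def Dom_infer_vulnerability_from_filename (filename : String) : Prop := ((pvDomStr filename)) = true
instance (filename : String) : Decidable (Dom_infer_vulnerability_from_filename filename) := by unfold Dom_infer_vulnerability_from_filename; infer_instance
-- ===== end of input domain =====

-- B replaces A's ordered per-category substring tests by a single left-to-right scan of the
-- lowered filename that prefix-matches a flat (pattern, category-index) table at every
-- position and keeps the minimum index; objective: alternative.

-- ===== PORT A =====
def infer_vulnerability_from_filename (filename : String) : String :=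
  let filename_lower := PySem.Str.lower filename
  if ["reentr", "reentran", "callback", "race", "toctou"].any
      (fun term => PySem.Str.isIn term filename_lower) then "reentrancy"
  else if ["overflow", "underflow", "arithmetic", "safemath", "math", "integer"].any
      (fun term => PySem.Str.isIn term filename_lower) then "arithmetic"
  else if ["access", "auth", "owner", "admin", "privilege", "permission", "role"].any
      (fun term => PySem.Str.isIn term filename_lower) then "access_control"
  else if ["unchecked", "call", "delegatecall", "send", "transfer", "return"].any
      (fun term => PySem.Str.isIn term filename_lower) then "unchecked_low_level_calls"
  else if ["dos", "denial", "gas", "loop", "unbounded", "block"].any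
      (fun term => PySem.Str.isIn term filename_lower) then "denial_of_service"
  else if ["timestamp", "time", "block.number", "now", "temporal"].any
      (fun term => PySem.Str.isIn term filename_lower) then "time_manipulation"
  else if ["random", "rng", "seed", "nonce", "predictable"].any
      (fun term => PySem.Str.isIn term filename_lower) then "bad_randomness"
  else if ["frontrun", "front-run", "mev", "order"].any
      (fun term => PySem.Str.isIn term filename_lower) then "front_running"
  else if ["erc20", "erc721", "erc1155", "standard", "openzeppelin"].any
      (fun term => PySem.Str.isIn term filename_lower) then "safe"
  else "other"

-- ===== PORT B =====
def vulnLabels : List String :=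
  ["reentrancy", "arithmetic", "access_control", "unchecked_low_level_calls",
   "denial_of_service", "time_manipulation", "bad_randomness", "front_running", "safe"]

def vulnPatterns : List (String × Nat) :=
  [("reentr", 0), ("reentran", 0), ("callback", 0), ("race", 0), ("toctou", 0),
   ("overflow", 1), ("underflow", 1), ("arithmetic", 1), ("safemath", 1), ("math", 1), ("integer", 1),
   ("access", 2), ("auth", 2), ("owner", 2), ("admin", 2), ("privilege", 2), ("permission", 2), ("role", 2),
   ("unchecked", 3), ("call", 3), ("delegatecall", 3), ("send", 3), ("transfer", 3), ("return", 3),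
   ("dos", 4), ("denial", 4), ("gas", 4), ("loop", 4), ("unbounded", 4), ("block", 4),
   ("timestamp", 5), ("time", 5), ("block.number", 5), ("now", 5), ("temporal", 5),
   ("random", 6), ("rng", 6), ("seed", 6), ("nonce", 6), ("predictable", 6),
   ("frontrun", 7), ("front-run", 7), ("mev", 7), ("order", 7),
   ("erc20", 8), ("erc721", 8), ("erc1155", 8), ("standard", 8), ("openzeppelin", 8)]

-- 'fl.startswith(pat, i)' with 0 ≤ i is exactly 'pat is a prefix of fl[i:]': ported as
-- PySem.Chars.startswith on (fl.drop i) — exact for the nonnegative i produced by range(len(fl)).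
def infer_vulnerability_from_filename_alt (filename : String) : String :=
  let fl := (PySem.Str.lower filename).toList
  let best := (List.range fl.length).foldl
    (fun b i => vulnPatterns.foldl
      (fun b pc => if PySem.Chars.startswith (fl.drop i) pc.1.toList then min b pc.2 else b) b)
    vulnLabels.length
  if best < vulnLabels.length then vulnLabels.getD best "other" else "other"

-- ===== PRECONDITION & SPEC =====
def Spec_infer_vulnerability_from_filename (filename : String) (out : String) : Prop := out = infer_vulnerability_from_filename_alt filename
instance (filename : String) (out : String) : Decidable (Spec_infer_vulnerability_from_filename filename out) := by unfold Spec_infer_vulnerability_from_filename; infer_instance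

-- ===== CLAIM =====
def Claim_equal_infer_vulnerability_from_filename : Prop := ∀ (filename : String), Dom_infer_vulnerability_from_filename filename → Spec_infer_vulnerability_from_filename filename (infer_vulnerability_from_filename filename)

-- ===== LEMMAS AND PROOFS =====

-- A's k-th branch condition as a function of the category index (definitionally A's tests).
def condA (c : Nat) (fl : String) : Bool :=
  match c with
  | 0 => ["reentr", "reentran", "callback", "race", "toctou"].any (fun term => PySem.Str.isIn term fl)
  | 1 => ["overflow", "underflow", "arithmetic", "safemath", "math", "integer"].any (fun term => PySem.Str.isIn term fl)
  | 2 => ["access", "auth", "owner", "admin", "privilege", "permission", "role"].any (fun term => PySem.Str.isIn term fl)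
  | 3 => ["unchecked", "call", "delegatecall", "send", "transfer", "return"].any (fun term => PySem.Str.isIn term fl)
  | 4 => ["dos", "denial", "gas", "loop", "unbounded", "block"].any (fun term => PySem.Str.isIn term fl)
  | 5 => ["timestamp", "time", "block.number", "now", "temporal"].any (fun term => PySem.Str.isIn term fl)
  | 6 => ["random", "rng", "seed", "nonce", "predictable"].any (fun term => PySem.Str.isIn term fl)
  | 7 => ["frontrun", "front-run", "mev", "order"].any (fun term => PySem.Str.isIn term fl)
  | 8 => ["erc20", "erc721", "erc1155", "standard", "openzeppelin"].any (fun term => PySem.Str.isIn term fl)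
  | _ => false

-- table sanity: no empty pattern
theorem patterns_nonempty : ∀ pc ∈ vulnPatterns, pc.1.toList ≠ [] := by decide

-- a table entry that occurs in fl makes A's branch condition for its category true
theorem mem_table_isIn_condA (p : String) (c : Nat) (fl : String)
    (hm : (p, c) ∈ vulnPatterns) (hin : PySem.Chars.isIn p.toList fl.toList = true) :
    condA c fl = true := by
  have hio : PySem.Str.isIn p fl = true := by simpa using hin
  fin_cases hm <;> simp_all [condA]

-- conversely, a true branch condition is witnessed by a table entry occurring in fl
theorem condA_exists_mem (c : Nat) (fl : String) (h : condA c fl = true) :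
    ∃ p, (p, c) ∈ vulnPatterns ∧ PySem.Chars.isIn p.toList fl.toList = true := by
  match c with
  | 0 | 1 | 2 | 3 | 4 | 5 | 6 | 7 | 8 =>
    simp only [condA, List.any_eq_true] at h
    obtain ⟨p, hp, hin⟩ := h
    refine ⟨p, ?_, by simpa using hin⟩
    fin_cases hp <;> decide
  | (n+9) => simp [condA] at h

-- inner fold characterization
theorem inner_fold_spec (s : List Char) (L : List (String × Nat)) (b : Nat) :
    let r := L.foldl (fun b pc => if PySem.Chars.startswith s pc.1.toList then min b pc.2 else b) b
    r ≤ b ∧ (r = b ∨ ∃ pc ∈ L, PySem.Chars.startswith s pc.1.toList = true ∧ r = pc.2) ∧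
      ∀ pc ∈ L, PySem.Chars.startswith s pc.1.toList = true → r ≤ pc.2 := by
  induction L generalizing b with
  | nil => simp
  | cons pc L ih =>
    simp only [List.foldl_cons]
    by_cases h : PySem.Chars.startswith s pc.1.toList = true
    · simp only [h, if_true]
      obtain ⟨h1, h2, h3⟩ := ih (min b pc.2)
      refine ⟨le_trans h1 (Nat.min_le_left _ _), ?_, ?_⟩
      · rcases h2 with h2 | ⟨qc, hq, hsw, hr⟩
        · rcases Nat.le_total b pc.2 with hb | hb
          · left; omega
          · right; exact ⟨pc, List.mem_cons_self, h, by omega⟩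
        · right; exact ⟨qc, List.mem_cons_of_mem _ hq, hsw, hr⟩
      · intro qc hq hsw
        rcases List.mem_cons.mp hq with rfl | hq
        · exact le_trans h1 (Nat.min_le_right _ _)
        · exact h3 qc hq hsw
    · simp only [h, Bool.false_eq_true, if_false]
      obtain ⟨h1, h2, h3⟩ := ih b
      refine ⟨h1, ?_, ?_⟩
      · rcases h2 with h2 | ⟨qc, hq, hsw, hr⟩
        · exact Or.inl h2
        · exact Or.inr ⟨qc, List.mem_cons_of_mem _ hq, hsw, hr⟩
      · intro qc hq hsw
        rcases List.mem_cons.mp hq with rfl | hq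
        · exact absurd hsw h
        · exact h3 qc hq hsw

-- outer fold characterization (over an arbitrary list of positions)
theorem outer_fold_spec (fl : List Char) (I : List Nat) (b : Nat) :
    let r := I.foldl (fun b i => vulnPatterns.foldl
      (fun b pc => if PySem.Chars.startswith (fl.drop i) pc.1.toList then min b pc.2 else b) b) b
    r ≤ b ∧
      (r = b ∨ ∃ i ∈ I, ∃ pc ∈ vulnPatterns,
        PySem.Chars.startswith (fl.drop i) pc.1.toList = true ∧ r = pc.2) ∧
      ∀ i ∈ I, ∀ pc ∈ vulnPatterns,
        PySem.Chars.startswith (fl.drop i) pc.1.toList = true → r ≤ pc.2 := by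
  induction I generalizing b with
  | nil => simp
  | cons i I ih =>
    simp only [List.foldl_cons]
    obtain ⟨g1, g2, g3⟩ := inner_fold_spec (fl.drop i) vulnPatterns b
    set b' := vulnPatterns.foldl
      (fun b pc => if PySem.Chars.startswith (fl.drop i) pc.1.toList then min b pc.2 else b) b with hb'
    obtain ⟨h1, h2, h3⟩ := ih b'
    refine ⟨le_trans h1 g1, ?_, ?_⟩
    · rcases h2 with h2 | ⟨j, hj, pc, hpc, hsw, hr⟩
      · rcases g2 with g2 | ⟨pc, hpc, hsw, hr⟩
        · left; omega
        · right; exact ⟨i, List.mem_cons_self, pc, hpc, hsw, by omega⟩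
      · right; exact ⟨j, List.mem_cons_of_mem _ hj, pc, hpc, hsw, hr⟩
    · intro j hj pc hpc hsw
      rcases List.mem_cons.mp hj with rfl | hj
      · exact le_trans h1 (g3 pc hpc hsw)
      · exact h3 j hj pc hpc hsw

-- a nonempty pattern occurs in fl iff it is a prefix at some position i < fl.length
theorem pos_iff_isIn (fl : List Char) (p : List Char) (hne : p ≠ []) :
    (∃ i ∈ List.range fl.length, PySem.Chars.startswith (fl.drop i) p = true) ↔
      PySem.Chars.isIn p fl = true := by
  rw [← PySem.Chars.exists_prefix_drop_iff_isIn]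
  constructor
  · rintro ⟨i, _, hsw⟩
    exact ⟨i, (PySem.Chars.startswith_iff _ _).mp hsw⟩
  · rintro ⟨j, hpre⟩
    by_cases hj : j < fl.length
    · exact ⟨j, List.mem_range.mpr hj, (PySem.Chars.startswith_iff _ _).mpr hpre⟩
    · exfalso
      rw [List.drop_eq_nil_of_le (by omega)] at hpre
      exact hne (List.prefix_nil.mp hpre)

-- ===== VERDICT =====
theorem infer_vulnerability_from_filename_spec : Claim_equal_infer_vulnerability_from_filename := by
  intro filename _
  unfold Spec_infer_vulnerability_from_filename
  simp only [infer_vulnerability_from_filename, infer_vulnerability_from_filename_alt]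
  set flS := PySem.Str.lower filename with hflS
  set fl := flS.toList with hfl
  obtain ⟨h1, h2, h3⟩ := outer_fold_spec fl (List.range fl.length) vulnLabels.length
  set r := (List.range fl.length).foldl
    (fun b i => vulnPatterns.foldl
      (fun b pc => if PySem.Chars.startswith (fl.drop i) pc.1.toList then min b pc.2 else b) b)
    vulnLabels.length with hr
  clear_value r
  have hlen : vulnLabels.length = 9 := by decide
  rw [hlen] at h1 h2
  have hmatch : ∀ p c, (p, c) ∈ vulnPatterns → PySem.Chars.isIn p.toList fl = true → r ≤ c := by
    intro p c hm hin
    obtain ⟨i, hi, hsw⟩ := (pos_iff_isIn fl p.toList (patterns_nonempty (p, c) hm)).mpr hin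
    exact h3 i hi (p, c) hm hsw
  have hcases : r = 9 ∨ ∃ p, (p, r) ∈ vulnPatterns ∧ PySem.Chars.isIn p.toList fl = true := by
    rcases h2 with h2 | ⟨i, hi, pc, hpc, hsw, hrv⟩
    · left; omega
    · right
      refine ⟨pc.1, by rw [hrv]; simpa using hpc, ?_⟩
      exact (pos_iff_isIn fl pc.1.toList (patterns_nonempty pc hpc)).mp ⟨i, hi, hsw⟩
  have hCr : ∀ c, condA c flS = true → r ≤ c := by
    intro c hc
    obtain ⟨p, hm, hin⟩ := condA_exists_mem c flS hc
    exact hmatch p c hm hin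
  have hrC : r ≠ 9 → condA r flS = true := by
    intro hne
    rcases hcases with h | ⟨p, hm, hin⟩
    · exact absurd h hne
    · exact mem_table_isIn_condA p r flS hm hin

  by_cases c0 : condA 0 flS = true
  · have hle := hCr 0 c0
    have hrk : r = 0 := by omega
    simp only [condA] at c0
    rw [if_pos c0, hrk]
    decide
  · by_cases c1 : condA 1 flS = true
    · have hle := hCr 1 c1
      have hrk : r = 1 := by
        have hc := hrC (by omega)
        interval_cases r
        · exact absurd hc c0
        · rfl
      simp only [condA] at c0 c1
      rw [if_neg c0, if_pos c1, hrk]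
      decide
    · by_cases c2 : condA 2 flS = true
      · have hle := hCr 2 c2
        have hrk : r = 2 := by
          have hc := hrC (by omega)
          interval_cases r
          · exact absurd hc c0
          · exact absurd hc c1
          · rfl
        simp only [condA] at c0 c1 c2
        rw [if_neg c0, if_neg c1, if_pos c2, hrk]
        decide
      · by_cases c3 : condA 3 flS = true
        · have hle := hCr 3 c3
          have hrk : r = 3 := by
            have hc := hrC (by omega)
            interval_cases r
            · exact absurd hc c0
            · exact absurd hc c1
            · exact absurd hc c2
            · rfl
          simp only [condA] at c0 c1 c2 c3
          rw [if_neg c0, if_neg c1, if_neg c2, if_pos c3, hrk]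
          decide
        · by_cases c4 : condA 4 flS = true
          · have hle := hCr 4 c4
            have hrk : r = 4 := by
              have hc := hrC (by omega)
              interval_cases r
              · exact absurd hc c0
              · exact absurd hc c1
              · exact absurd hc c2
              · exact absurd hc c3
              · rfl
            simp only [condA] at c0 c1 c2 c3 c4
            rw [if_neg c0, if_neg c1, if_neg c2, if_neg c3, if_pos c4, hrk]
            decide
          · by_cases c5 : condA 5 flS = true
            · have hle := hCr 5 c5
              have hrk : r = 5 := by
                have hc := hrC (by omega)
                interval_cases r
                · exact absurd hc c0
                · exact absurd hc c1
                · exact absurd hc c2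
                · exact absurd hc c3
                · exact absurd hc c4
                · rfl
              simp only [condA] at c0 c1 c2 c3 c4 c5
              rw [if_neg c0, if_neg c1, if_neg c2, if_neg c3, if_neg c4, if_pos c5, hrk]
              decide
            · by_cases c6 : condA 6 flS = true
              · have hle := hCr 6 c6
                have hrk : r = 6 := by
                  have hc := hrC (by omega)
                  interval_cases r
                  · exact absurd hc c0
                  · exact absurd hc c1
                  · exact absurd hc c2
                  · exact absurd hc c3
                  · exact absurd hc c4
                  · exact absurd hc c5
                  · rfl
                simp only [condA] at c0 c1 c2 c3 c4 c5 c6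
                rw [if_neg c0, if_neg c1, if_neg c2, if_neg c3, if_neg c4, if_neg c5, if_pos c6, hrk]
                decide
              · by_cases c7 : condA 7 flS = true
                · have hle := hCr 7 c7
                  have hrk : r = 7 := by
                    have hc := hrC (by omega)
                    interval_cases r
                    · exact absurd hc c0
                    · exact absurd hc c1
                    · exact absurd hc c2
                    · exact absurd hc c3
                    · exact absurd hc c4
                    · exact absurd hc c5
                    · exact absurd hc c6
                    · rfl
                  simp only [condA] at c0 c1 c2 c3 c4 c5 c6 c7
                  rw [if_neg c0, if_neg c1, if_neg c2, if_neg c3, if_neg c4, if_neg c5, if_neg c6, if_pos c7, hrk]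
                  decide
                · by_cases c8 : condA 8 flS = true
                  · have hle := hCr 8 c8
                    have hrk : r = 8 := by
                      have hc := hrC (by omega)
                      interval_cases r
                      · exact absurd hc c0
                      · exact absurd hc c1
                      · exact absurd hc c2
                      · exact absurd hc c3
                      · exact absurd hc c4
                      · exact absurd hc c5
                      · exact absurd hc c6
                      · exact absurd hc c7
                      · rfl
                    simp only [condA] at c0 c1 c2 c3 c4 c5 c6 c7 c8
                    rw [if_neg c0, if_neg c1, if_neg c2, if_neg c3, if_neg c4, if_neg c5, if_neg c6, if_neg c7, if_pos c8, hrk]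
                    decide
                  · have hrk : r = 9 := by
                      by_contra hne
                      have hc := hrC hne
                      interval_cases r
                      · exact absurd hc c0
                      · exact absurd hc c1
                      · exact absurd hc c2
                      · exact absurd hc c3
                      · exact absurd hc c4
                      · exact absurd hc c5
                      · exact absurd hc c6
                      · exact absurd hc c7
                      · exact absurd hc c8
                      · exact hne rfl
                    simp only [condA] at c0 c1 c2 c3 c4 c5 c6 c7 c8
                    rw [if_neg c0, if_neg c1, if_neg c2, if_neg c3, if_neg c4, if_neg c5, if_neg c6, if_neg c7, if_neg c8, hrk]
                    decide
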